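-- pv_equiv track=rewrite | github.com/IBM-S/testing | EXTRA/codigo_latex.py | generar_codigo_latex
-- ===== SOURCE A (Python) =====
-- def generar_codigo_latex(lista_instancias, ruta_base):
--     """
--     Genera el código LaTeX para subfiguras a partir de una lista de instancias y una ruta base.
--
--     Args:
--         lista_instancias: Lista de nombres de las instancias.
--         ruta_base: Ruta base de las imágenes.
--
--     Returns:
--         Una cadena con el código LaTeX generado.
--     """
--
--     codigo_latex = "\\begin{figure}[htbp]\n"
--     codigo_latex += "    \\centering\n"
--     contador = 1
--     for instancia in lista_instancias:
--         codigo_latex += f"    \\begin{{subfigure}}{{0.24\\textwidth}}\n"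
--         codigo_latex += f"        \\includegraphics[width=\\textwidth]{{{ruta_base}/{instancia}.png}}\n"
--         parte1, parte2 = instancia.split("_")
--         instancia = f'{parte1}'
--         codigo_latex += f"        \\caption{{{instancia}}}\n"
--         codigo_latex += "    \\end{subfigure}\n"
--         if contador % 24 == 0:
--             codigo_latex += "    \\end{figure}\n"
--             codigo_latex += "\\begin{figure}[htbp]\n"
--             codigo_latex += "    \\centering\n"
--
--         else:
--             codigo_latex += "    \\hfill\n"
--
--         contador+=1
--
--     codigo_latex += "    \\caption{Instancias X-nA-kB. Con Cluster, las hice con codigo JupyterNotebook}\n"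
--     codigo_latex += "    \\label{fig:subfigures}\n"
--     codigo_latex += "\\end{figure}"
--
--     return codigo_latex
-- ===== SOURCE B (Python) =====
-- def generar_codigo_latex(lista_instancias, ruta_base):
--     HEADER = "\\begin{figure}[htbp]\n    \\centering\n"
--     HFILL = "    \\hfill\n"
--     BREAK = "    \\end{figure}\n\\begin{figure}[htbp]\n    \\centering\n"
--     FOOTER = ("    \\caption{Instancias X-nA-kB. Con Cluster, las hice con codigo JupyterNotebook}\n"
--               "    \\label{fig:subfigures}\n"
--               "\\end{figure}")
--     # chunk the instance list into figures of 24 subfigures each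
--     chunks = []
--     resto = lista_instancias
--     while resto:
--         chunks.append(resto[:24])
--         resto = resto[24:]
--     codigo = HEADER
--     for chunk in chunks:
--         for j, instancia in enumerate(chunk):
--             parte1, parte2 = instancia.split("_")
--             caption = parte1
--             codigo += ("    \\begin{subfigure}{0.24\\textwidth}\n"
--                        f"        \\includegraphics[width=\\textwidth]{{{ruta_base}/{instancia}.png}}\n"
--                        f"        \\caption{{{caption}}}\n"
--                        "    \\end{subfigure}\n")
--             if j == len(chunk) - 1 and len(chunk) == 24:
--                 codigo += BREAK
--             else:
--                 codigo += HFILL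
--     return codigo + FOOTER
-- ===== Notes on version B (the rewrite author's own statement) =====
-- stated objective: alternative
-- what changed: Replaces A's single counter-driven loop (contador % 24 deciding figure breaks) by first slicing the list into explicit chunks of 24 and then a nested loop over chunks, emitting the figure break exactly after a full 24-item chunk.
import Mathlib
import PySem

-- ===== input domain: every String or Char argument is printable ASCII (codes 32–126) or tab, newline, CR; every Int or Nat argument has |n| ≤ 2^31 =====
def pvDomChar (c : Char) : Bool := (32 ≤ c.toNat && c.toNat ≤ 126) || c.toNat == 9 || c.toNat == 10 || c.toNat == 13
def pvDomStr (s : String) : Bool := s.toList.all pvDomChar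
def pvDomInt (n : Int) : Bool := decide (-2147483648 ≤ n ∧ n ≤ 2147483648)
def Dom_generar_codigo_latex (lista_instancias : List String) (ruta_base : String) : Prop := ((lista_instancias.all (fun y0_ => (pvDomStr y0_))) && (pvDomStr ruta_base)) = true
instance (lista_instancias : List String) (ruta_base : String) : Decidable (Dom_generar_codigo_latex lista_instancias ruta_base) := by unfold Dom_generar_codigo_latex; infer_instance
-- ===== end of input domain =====

-- B replaces A's single counter-driven loop by an explicit chunking of the list into
-- figures of 24 subfigures (slice-based while loop) and a nested loop over the chunks
-- (objective: alternative decomposition, same cost).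


-- shared text constants (identical literals in both Pythons)
def pvHEADER : String := "\\begin{figure}[htbp]\n    \\centering\n"
def pvHFILL : String := "    \\hfill\n"
def pvBREAK : String := "    \\end{figure}\n\\begin{figure}[htbp]\n    \\centering\n"
def pvFOOTER : String := "    \\caption{Instancias X-nA-kB. Con Cluster, las hice con codigo JupyterNotebook}\n    \\label{fig:subfigures}\n\\end{figure}"
-- one subfigure block (the literal text both Pythons emit per instance; caption passed in)
def pvSub (ruta inst cap : String) : String :=
  "    \\begin{subfigure}{0.24\\textwidth}\n" ++
  "        \\includegraphics[width=\\textwidth]{" ++ ruta ++ "/" ++ inst ++ ".png}\n" ++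
  "        \\caption{" ++ cap ++ "}\n" ++
  "    \\end{subfigure}\n"

-- ===== PORT A =====
-- A's loop: state (codigo_latex, contador); 'parte1, parte2 = instancia.split("_")' raises
-- ValueError unless the split has exactly 2 parts — modelled by the Option state (none = raise).
def pvStepA (ruta : String) (st : Option (String × Int)) (inst : String) : Option (String × Int) :=
  st.bind fun p =>
    match (PySem.Str.split? inst "_").getD [] with
    | [p1, _p2] =>
        some (p.1 ++ pvSub ruta inst p1 ++ (if p.2 % 24 == 0 then pvBREAK else pvHFILL), p.2 + 1)
    | _ => none

def generar_codigo_latex (lista_instancias : List String) (ruta_base : String) : String :=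
  match lista_instancias.foldl (pvStepA ruta_base) (some (pvHEADER, 1)) with
  | some p => p.1 ++ pvFOOTER
  | none => ""   -- Python raises ValueError here; excluded by Pre_

-- ===== PORT B =====
-- chunks: while resto: chunks.append(resto[:24]); resto = resto[24:]
def pvChunksB (l : List String) : List (List String) :=
  if h : l = [] then []
  else PySem.List.slice l none (some 24) :: pvChunksB (PySem.List.slice l (some 24) none)
termination_by l.length
decreasing_by
  rw [PySem.List.slice_from l (by norm_num : (0:Int) ≤ 24)]
  simp only [List.length_drop]
  cases l with
  | nil => exact absurd rfl h
  | cons x xs => simp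

-- caption: 'parte1, parte2 = instancia.split("_")' (ValueError unless exactly 2 parts --
-- those inputs are excluded by Pre_; the port returns "" there, outside the claim)
def pvCapB (inst : String) : String :=
  match (PySem.Str.split? inst "_").getD [] with
  | [p1, _p2] => p1
  | _ => ""

def generar_codigo_latex_alt (lista_instancias : List String) (ruta_base : String) : String :=
  ((pvChunksB lista_instancias).foldl (fun acc chunk =>
    (PySem.List.enumerate chunk 0).foldl (fun a ji =>
      a ++ pvSub ruta_base ji.2 (pvCapB ji.2)
        ++ (if ji.1 == (chunk.length : Int) - 1 && chunk.length == 24 then pvBREAK else pvHFILL))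
      acc) pvHEADER) ++ pvFOOTER

-- ===== PRECONDITION & SPEC =====
-- Pre_ excludes exactly the inputs where A raises ValueError: an instance whose split("_")
-- does not have exactly 2 parts (i.e. not exactly one '_'); B returns a value there.
def Pre_generar_codigo_latex (lista_instancias : List String) (ruta_base : String) : Prop :=
  ∀ inst ∈ lista_instancias, ((PySem.Str.split? inst "_").getD []).length = 2
instance (lista_instancias : List String) (ruta_base : String) : Decidable (Pre_generar_codigo_latex lista_instancias ruta_base) := by unfold Pre_generar_codigo_latex; infer_instance

def pvWitness_generar_codigo_latex : List String × String := (["X-5A_k3", "Y-2B_k1"], "img/run")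

def Spec_generar_codigo_latex (lista_instancias : List String) (ruta_base : String) (out : String) : Prop := out = generar_codigo_latex_alt lista_instancias ruta_base
instance (lista_instancias : List String) (ruta_base : String) (out : String) : Decidable (Spec_generar_codigo_latex lista_instancias ruta_base out) := by unfold Spec_generar_codigo_latex; infer_instance

-- ===== CLAIM (what is proved, stated in full; the proofs are below) =====
def Claim_equal_generar_codigo_latex : Prop := ∀ (lista_instancias : List String) (ruta_base : String), Dom_generar_codigo_latex lista_instancias ruta_base → Pre_generar_codigo_latex lista_instancias ruta_base → Spec_generar_codigo_latex lista_instancias ruta_base (generar_codigo_latex lista_instancias ruta_base)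

-- ===== LEMMAS AND PROOFS =====

-- caption B computes: first part of the split
-- pure rendering of A's loop body from counter c
def pvRender (ruta : String) : List String → Int → String
  | [], _ => ""
  | x :: xs, c => pvSub ruta x (pvCapB x) ++ (if c % 24 == 0 then pvBREAK else pvHFILL) ++ pvRender ruta xs (c + 1)

-- pure rendering of B's inner loop over one chunk of declared length len, from index j
def pvInner (ruta : String) (len : Nat) : List String → Int → String
  | [], _ => ""
  | x :: xs, j => pvSub ruta x (pvCapB x) ++ (if j == (len : Int) - 1 && len == 24 then pvBREAK else pvHFILL) ++ pvInner ruta len xs (j + 1)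

-- concatenation of the inner renderings of all chunks
def pvJ (ruta : String) : List (List String) → String
  | [] => ""
  | c :: cs => pvInner ruta c.length c 0 ++ pvJ ruta cs

theorem pv_foldA (ruta : String) : ∀ (l : List String) (acc : String) (c : Int),
    (∀ x ∈ l, ((PySem.Str.split? x "_").getD []).length = 2) →
    l.foldl (pvStepA ruta) (some (acc, c)) =
      some (acc ++ pvRender ruta l c, c + l.length) := by
  intro l
  induction l with
  | nil => intro acc c _; simp [pvRender]
  | cons x xs ih =>
    intro acc c hpre
    have hx := hpre x (by simp)
    cases hs : (PySem.Str.split? x "_").getD [] with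
    | nil => rw [hs] at hx; simp at hx
    | cons p1 rest =>
      cases rest with
      | nil => rw [hs] at hx; simp at hx
      | cons p2 rest2 =>
        cases rest2 with
        | cons q qs => rw [hs] at hx; simp at hx
        | nil =>
          simp only [List.foldl_cons, pvStepA, hs, Option.bind_some]
          rw [ih _ _ (fun y hy => hpre y (by simp [hy]))]
          have hcap : pvCapB x = p1 := by
            simp [pvCapB, hs]
          simp only [pvRender, hcap, String.append_assoc, List.length_cons]
          simp only [Option.some.injEq, Prod.mk.injEq]
          exact ⟨trivial, by push_cast; ring⟩

theorem pv_enum_fold (ruta : String) (len : Nat) :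
    ∀ (rest : List String) (s : Int) (acc : String),
    (PySem.List.enumerate rest s).foldl (fun a ji =>
      a ++ pvSub ruta ji.2 (pvCapB ji.2)
        ++ (if ji.1 == (len : Int) - 1 && len == 24 then pvBREAK else pvHFILL)) acc
    = acc ++ pvInner ruta len rest s := by
  intro rest
  induction rest with
  | nil => intro s acc; simp [PySem.List.enumerate_nil, pvInner]
  | cons x xs ih =>
    intro s acc
    rw [PySem.List.enumerate_cons, List.foldl_cons, ih]
    simp only [pvInner, pvCapB, String.append_assoc]

theorem pv_foldChunks (ruta : String) : ∀ (cs : List (List String)) (acc : String),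
    cs.foldl (fun acc chunk =>
      (PySem.List.enumerate chunk 0).foldl (fun a ji =>
        a ++ pvSub ruta ji.2 (pvCapB ji.2)
          ++ (if ji.1 == (chunk.length : Int) - 1 && chunk.length == 24 then pvBREAK else pvHFILL))
        acc) acc
    = acc ++ pvJ ruta cs := by
  intro cs
  induction cs with
  | nil => intro acc; simp [pvJ]
  | cons c cs ih =>
    intro acc
    rw [List.foldl_cons, pv_enum_fold, ih, pvJ, String.append_assoc]

theorem pv_render_append (ruta : String) : ∀ (l1 l2 : List String) (c : Int),
    pvRender ruta (l1 ++ l2) c = pvRender ruta l1 c ++ pvRender ruta l2 (c + l1.length) := by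
  intro l1
  induction l1 with
  | nil => intro l2 c; simp [pvRender]
  | cons x xs ih =>
    intro l2 c
    simp only [List.cons_append, pvRender, ih, String.append_assoc, List.length_cons]
    rw [show c + (((xs.length + 1 : Nat) : Int)) = c + 1 + (xs.length : Int) from by push_cast; ring]

theorem pv_render_period (ruta : String) : ∀ (l : List String) (c : Int),
    pvRender ruta l (c + 24) = pvRender ruta l c := by
  intro l
  induction l with
  | nil => intro c; rfl
  | cons x xs ih =>
    intro c
    simp only [pvRender]
    have h1 : (c + 24) % 24 = c % 24 := by omega
    have h2 : c + 24 + 1 = c + 1 + 24 := by ring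
    rw [h1, h2, ih]

theorem pv_inner_eq (ruta : String) : ∀ (rest : List String) (j len : Nat),
    j + rest.length = len → len ≤ 24 →
    pvInner ruta len rest (j : Int) = pvRender ruta rest ((j : Int) + 1) := by
  intro rest
  induction rest with
  | nil => intro j len _ _; rfl
  | cons x xs ih =>
    intro j len hlen h24
    simp only [pvInner, pvRender]
    have hb : (((j : Int) == (len : Int) - 1) && (len == 24)) = (((j : Int) + 1) % 24 == 0) := by
      simp only [List.length_cons] at hlen
      rcases eq_or_ne j 23 with hj | hj
      · subst hj
        have h24 : len = 24 := by omega
        subst h24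
        decide
      · have hA : (((j : Int) == (len : Int) - 1) && (len == 24)) = false := by
          rw [Bool.eq_false_iff]
          intro htrue
          rw [Bool.and_eq_true] at htrue
          simp only [beq_iff_eq] at htrue
          omega
        have hB : ((((j : Int) + 1) % 24 == 0)) = false := by
          rw [Bool.eq_false_iff]
          intro htrue
          simp only [beq_iff_eq] at htrue
          omega
        rw [hA, hB]
    rw [hb]
    have hj1 : ((j : Int) + 1) = (((j + 1 : Nat) : Int)) := by push_cast; ring
    rw [hj1, ih (j + 1) len (by simp only [List.length_cons] at hlen; omega) h24]

theorem pv_chunks_cons (l : List String) (h : l ≠ []) :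
    pvChunksB l = l.take 24 :: pvChunksB (l.drop 24) := by
  rw [pvChunksB, dif_neg h,
      PySem.List.slice_to l (by norm_num : (0:Int) ≤ 24),
      PySem.List.slice_from l (by norm_num : (0:Int) ≤ 24)]
  rfl

theorem pv_chunks_nil : pvChunksB [] = [] := by
  rw [pvChunksB]
  rfl

theorem pv_render_eq_J (ruta : String) : ∀ (l : List String),
    pvRender ruta l 1 = pvJ ruta (pvChunksB l) := by
  have H : ∀ (n : Nat) (l : List String), l.length ≤ n →
      pvRender ruta l 1 = pvJ ruta (pvChunksB l) := by
    intro n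
    induction n with
    | zero =>
      intro l hl
      have : l = [] := List.eq_nil_of_length_eq_zero (by omega)
      subst this
      rw [pv_chunks_nil]; rfl
    | succ n ih =>
      intro l hl
      by_cases hnil : l = []
      · subst hnil; rw [pv_chunks_nil]; rfl
      · rw [pv_chunks_cons l hnil]
        have hsplit : pvRender ruta l 1
            = pvRender ruta (l.take 24) 1 ++ pvRender ruta (l.drop 24) (1 + ((l.take 24).length : Int)) := by
          conv_lhs => rw [← List.take_append_drop 24 l]
          exact pv_render_append ruta (l.take 24) (l.drop 24) 1
        have hinner : pvInner ruta (l.take 24).length (l.take 24) ((0 : Nat) : Int)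
            = pvRender ruta (l.take 24) 1 := by
          have := pv_inner_eq ruta (l.take 24) 0 (l.take 24).length (by omega)
            (by simp [List.length_take])
          simpa using this
        simp only [pvJ]
        rw [hsplit, ← hinner]
        by_cases hle : l.length ≤ 24
        · have hd : l.drop 24 = [] := by
            apply List.eq_nil_of_length_eq_zero
            simp [List.length_drop]; omega
          rw [hd, pv_chunks_nil]
          simp [pvRender, pvJ]
        · have ht : ((l.take 24).length : Int) = 24 := by
            simp [List.length_take]; omega
          rw [ht]
          have : (1 : Int) + 24 = 1 + 24 := rfl
          rw [show (1 : Int) + 24 = (1 : Int) + 24 from rfl]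
          rw [show pvRender ruta (l.drop 24) (1 + 24) = pvRender ruta (l.drop 24) 1 from
            pv_render_period ruta (l.drop 24) 1]
          rw [ih (l.drop 24) (by simp [List.length_drop]; omega)]
          simp
  intro l; exact H l.length l le_rfl

-- ===== VERDICT (by name: the statement is the Claim_ definition above) =====
theorem generar_codigo_latex_spec : Claim_equal_generar_codigo_latex := by
  intro l ruta _hdom hpre
  unfold Spec_generar_codigo_latex
  unfold generar_codigo_latex generar_codigo_latex_alt
  rw [pv_foldA ruta l pvHEADER 1 hpre]
  rw [pv_foldChunks ruta (pvChunksB l) pvHEADER]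
  rw [pv_render_eq_J ruta l]
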